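-- pv_equiv track=rewrite | github.com/nitinksah/namematch | text_preprocessing.py | removeMatchedWord
-- ===== SOURCE A (Python) =====
-- def removeMatchedWord(query_string, tokenize_sentence):
--
--     query_string, tokenize_sentence = query_string.split(" "), tokenize_sentence.split(" ")
--     duplicates = {}
--
--     tokenization = []
--     tokenization.extend(query_string)
--     query_len = len(tokenization)
--
--     tokenization.extend(tokenize_sentence)
--
--     for idx in range(len(tokenization)):
--         if tokenization[idx] in duplicates:
--             duplicates[tokenization[idx]][0] += 1
--             duplicates[tokenization[idx]][1].append(idx)
--         else:
--             duplicates[tokenization[idx]] = [1, [idx]]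
--
--     for _, key in enumerate(duplicates):
--         if duplicates[key][0] > 1:
--             for idx in duplicates[key][1]:
--                 tokenization[idx] = ""
--
--     query_string, tokenize_sentence = tokenization[0: query_len], tokenization[query_len:]
--     return " ".join(query_string), " ".join(tokenize_sentence)
-- ===== SOURCE B (Python) =====
-- def removeMatchedWord(query_string, tokenize_sentence):
--     q = query_string.split(" ")
--     s = tokenize_sentence.split(" ")
--
--     def blank(this, other):
--         return " ".join("" if this.count(t) > 1 or t in other else t for t in this)
--
--     return blank(q, s), blank(s, q)
-- ===== Notes on version B (the rewrite author's own statement) =====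
-- stated objective: alternative
-- what changed: Drops A's shared dict of [count, position-list] and its index-mutating write-back entirely: B keeps no table at all and decides each token on the spot by a symmetric cross-check (duplicated within its own list, or present in the other list), rebuilding each output directly.
import Mathlib
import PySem

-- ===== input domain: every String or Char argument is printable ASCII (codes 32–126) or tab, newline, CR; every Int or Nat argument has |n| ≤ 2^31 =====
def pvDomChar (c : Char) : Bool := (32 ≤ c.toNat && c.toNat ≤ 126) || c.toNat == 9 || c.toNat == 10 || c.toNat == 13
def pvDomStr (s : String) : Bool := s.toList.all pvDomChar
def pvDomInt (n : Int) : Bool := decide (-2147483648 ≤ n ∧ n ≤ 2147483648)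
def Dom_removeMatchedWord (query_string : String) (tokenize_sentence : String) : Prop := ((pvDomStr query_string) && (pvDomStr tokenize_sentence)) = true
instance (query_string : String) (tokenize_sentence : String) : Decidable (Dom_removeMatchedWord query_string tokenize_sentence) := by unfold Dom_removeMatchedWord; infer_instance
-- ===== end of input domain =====

-- B keeps no table at all: instead of A's dict of [count, position-list] plus an index-mutating
-- write-back, it decides each token on the spot by a symmetric cross-check (duplicated in its own
-- list, or present in the other list) and rebuilds each output directly (alternative, not faster).


-- ===== PORT A =====
-- split(" ") has a nonempty separator, so PySem.Str.split? is always `some`: `.getD []` is exact.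
-- `tokenization[idx]` is read only for idx ∈ range(len(tokenization)), so `List.getD _ _ ""` is exact there,
-- and the indices stored in `duplicates` are those same in-range Nats, so `List.set` is exact for the write-back.
def removeMatchedWord (query_string : String) (tokenize_sentence : String) : String × String :=
  let qs := (PySem.Str.split? query_string " ").getD []
  let ss := (PySem.Str.split? tokenize_sentence " ").getD []
  let tokenization := qs
  let query_len := tokenization.length
  let tokenization := tokenization ++ ss
  let duplicates :=
    (List.range tokenization.length).foldl
      (fun d idx =>
        let t := tokenization.getD idx ""
        match d.get? t with
        | some v => d.insert t (v.1 + 1, v.2 ++ [idx])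
        | none   => d.insert t ((1 : Int), ([idx] : List Nat)))
      (PySem.Dict.empty : PySem.Dict String (Int × List Nat))
  let tokenization :=
    duplicates.keys.foldl
      (fun lst key =>
        let v := duplicates.getD key (0, [])
        if v.1 > 1 then v.2.foldl (fun l i => l.set i "") lst else lst)
      tokenization
  (PySem.Str.join " " (PySem.List.slice tokenization (some 0) (some (query_len : Int))),
   PySem.Str.join " " (PySem.List.slice tokenization (some (query_len : Int)) none))

-- ===== PORT B =====
-- `this.count(t)` → PySem.List.count; `t in other` → List.contains (exact for list membership).
def removeMatchedWordBlank (this other : List String) : String :=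
  PySem.Str.join " "
    (this.map (fun t => if PySem.List.count this t > 1 || other.contains t then "" else t))

def removeMatchedWord_alt (query_string : String) (tokenize_sentence : String) : String × String :=
  let q := (PySem.Str.split? query_string " ").getD []
  let s := (PySem.Str.split? tokenize_sentence " ").getD []
  (removeMatchedWordBlank q s, removeMatchedWordBlank s q)

-- ===== PRECONDITION & SPEC =====
def Spec_removeMatchedWord (query_string : String) (tokenize_sentence : String) (out : String × String) : Prop := out = removeMatchedWord_alt query_string tokenize_sentence
instance (query_string : String) (tokenize_sentence : String) (out : String × String) : Decidable (Spec_removeMatchedWord query_string tokenize_sentence out) := by unfold Spec_removeMatchedWord; infer_instance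

-- ===== CLAIM (what is proved, stated in full; the proofs are below) =====
def Claim_equal_removeMatchedWord : Prop := ∀ (query_string : String) (tokenize_sentence : String), Dom_removeMatchedWord query_string tokenize_sentence → Spec_removeMatchedWord query_string tokenize_sentence (removeMatchedWord query_string tokenize_sentence)

-- ===== LEMMAS AND PROOFS =====

-- positions of token k in toks (the index list A's first pass records for k)
def pvIdxs (toks : List String) (k : String) : List Nat :=
  (List.range toks.length).filter (fun i => toks.getD i "" = k)

theorem pvMem_pvIdxs (toks : List String) (k : String) (j : Nat) :
    j ∈ pvIdxs toks k ↔ j < toks.length ∧ toks.getD j "" = k := by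
  simp [pvIdxs, List.mem_filter, List.mem_range]

-- A's first pass: the dict maps each token seen so far to its count and its position list.
theorem pvBuild_spec (toks : List String) (m : Nat) (hm : m ≤ toks.length) :
    (let d := (List.range m).foldl
      (fun d idx =>
        let t := toks.getD idx ""
        match d.get? t with
        | some v => d.insert t (v.1 + 1, v.2 ++ [idx])
        | none   => d.insert t ((1 : Int), ([idx] : List Nat)))
      (PySem.Dict.empty : PySem.Dict String (Int × List Nat))
    d.keys.Nodup ∧ ∀ k, d.get? k =
      if k ∈ toks.take m then
        some ((((toks.take m).count k : Nat) : Int),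
              (List.range m).filter (fun i => toks.getD i "" = k))
      else none) := by
  induction m with
  | zero => simp [PySem.Dict.get?_empty]
  | succ m ih =>
    obtain ⟨hnd, hget⟩ := ih (by omega)
    have hmlt : m < toks.length := by omega
    have ht : toks.getD m "" = toks[m] := by
      rw [List.getD_eq_getElem?_getD, List.getElem?_eq_getElem hmlt]; rfl
    have htake : toks.take (m+1) = toks.take m ++ [toks[m]] := by
      rw [List.take_add_one, List.getElem?_eq_getElem hmlt]; rfl
    rw [List.range_succ, List.foldl_append, List.foldl_cons, List.foldl_nil]
    set d := (List.range m).foldl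
      (fun d idx =>
        let t := toks.getD idx ""
        match d.get? t with
        | some v => d.insert t (v.1 + 1, v.2 ++ [idx])
        | none   => d.insert t ((1 : Int), ([idx] : List Nat)))
      (PySem.Dict.empty : PySem.Dict String (Int × List Nat)) with hd
    simp only [ht]
    set t := toks[m] with htt
    have ht' : toks[m]?.getD "" = t := by rw [List.getElem?_eq_getElem hmlt]; rfl
    have hmemtake : ∀ i, i < m → toks.getD i "" ∈ toks.take m := by
      intro i hi
      have h1 : toks.getD i "" = (toks.take m)[i]'(by simpa [List.length_take] using by omega) := by
        rw [List.getD_eq_getElem?_getD, List.getElem?_eq_getElem (by omega : i < toks.length)]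
        simp [List.getElem_take]
      rw [h1]; exact List.getElem_mem _
    rcases hcase : d.get? t with _ | v
    · -- t not seen yet
      have htmem : t ∉ toks.take m := by
        by_contra hmem
        rw [hget t, if_pos hmem] at hcase; exact absurd hcase (by simp)
      refine ⟨PySem.Dict.nodup_keys_insert _ _ _ hnd, fun k => ?_⟩
      by_cases hk : k = t
      · subst hk
        rw [PySem.Dict.get?_insert_self, if_pos (by rw [htake]; simp)]
        have hcnt : (toks.take (m+1)).count t = 1 := by
          rw [htake, List.count_append]
          simp [List.count_eq_zero_of_not_mem htmem]
        have hfil : (List.range m ++ [m]).filter (fun i => toks.getD i "" = t) = [m] := by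
          rw [List.filter_append]
          have h1 : (List.range m).filter (fun i => toks.getD i "" = t) = [] := by
            rw [List.filter_eq_nil_iff]
            intro i hi
            simp only [List.mem_range] at hi
            simp only [decide_eq_true_eq]
            intro hEq
            exact htmem (hEq ▸ hmemtake i hi)
          rw [h1]
          simp [ht']
        rw [hcnt, hfil]; norm_num
      · have hkt : t ≠ k := fun h => hk h.symm
        rw [PySem.Dict.get?_insert_of_ne _ _ hk, hget k]
        have hk2 : (k ∈ toks.take (m+1)) ↔ (k ∈ toks.take m) := by
          rw [htake]; simp [hk]
        have hc2 : (toks.take (m+1)).count k = (toks.take m).count k := by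
          rw [htake, List.count_append]
          simp [hkt]
        have hf2 : (List.range m ++ [m]).filter (fun i => toks.getD i "" = k)
            = (List.range m).filter (fun i => toks.getD i "" = k) := by
          rw [List.filter_append]
          simp [ht', hkt]
        rw [hc2, hf2]
        exact if_congr hk2.symm rfl rfl
    · -- t already present, with value v
      have htmem : t ∈ toks.take m := by
        by_contra hmem
        rw [hget t, if_neg hmem] at hcase; exact absurd hcase (by simp)
      have hv : v = ((((toks.take m).count t : Nat) : Int),
          (List.range m).filter (fun i => toks.getD i "" = t)) := by
        rw [hget t, if_pos htmem] at hcase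
        exact (Option.some_inj.mp hcase).symm
      refine ⟨PySem.Dict.nodup_keys_insert _ _ _ hnd, fun k => ?_⟩
      by_cases hk : k = t
      · subst hk
        rw [PySem.Dict.get?_insert_self, if_pos (by rw [htake]; simp)]
        have hcnt : (((toks.take (m+1)).count t : Nat) : Int) = v.1 + 1 := by
          rw [htake, List.count_append, hv]
          push_cast
          simp
        have hfil : (List.range m ++ [m]).filter (fun i => toks.getD i "" = t) = v.2 ++ [m] := by
          rw [List.filter_append, hv]
          simp [ht']
        rw [hcnt, hfil]
      · have hkt : t ≠ k := fun h => hk h.symm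
        rw [PySem.Dict.get?_insert_of_ne _ _ hk, hget k]
        have hk2 : (k ∈ toks.take (m+1)) ↔ (k ∈ toks.take m) := by
          rw [htake]; simp [hk]
        have hc2 : (toks.take (m+1)).count k = (toks.take m).count k := by
          rw [htake, List.count_append]
          simp [hkt]
        have hf2 : (List.range m ++ [m]).filter (fun i => toks.getD i "" = k)
            = (List.range m).filter (fun i => toks.getD i "" = k) := by
          rw [List.filter_append]
          simp [ht', hkt]
        rw [hc2, hf2]
        exact if_congr hk2.symm rfl rfl

-- blanking a list of positions: length and elementwise effect
theorem pvSetAll_length (is : List Nat) (acc : List String) :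
    (is.foldl (fun l i => l.set i "") acc).length = acc.length := by
  induction is generalizing acc with
  | nil => rfl
  | cons i is ih => simp [List.foldl_cons, ih]

theorem pvSetAll_getD (is : List Nat) (acc : List String) (j : Nat) (hj : j < acc.length) :
    (is.foldl (fun l i => l.set i "") acc).getD j "" = if j ∈ is then "" else acc.getD j "" := by
  induction is generalizing acc with
  | nil => simp
  | cons i is ih =>
    rw [List.foldl_cons, ih _ (by simpa using hj)]
    by_cases hji : j ∈ is
    · simp [hji]
    · simp only [hji, if_false, List.mem_cons, or_false]
      rw [List.getD_eq_getElem?_getD, List.getD_eq_getElem?_getD, List.getElem?_set]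
      by_cases hij : i = j
      · subst hij; simp [hj]
      · simp [hij, Ne.symm hij]

-- A's second pass preserves the length
theorem pvPhase2_length (d : PySem.Dict String (Int × List Nat)) (keys : List String) (acc : List String) :
    (keys.foldl (fun lst key => if (d.getD key (0, [])).1 > 1 then (d.getD key (0, [])).2.foldl (fun l i => l.set i "") lst else lst) acc).length
      = acc.length := by
  induction keys generalizing acc with
  | nil => rfl
  | cons k ks ih =>
    rw [List.foldl_cons, ih]
    split <;> simp [pvSetAll_length]

-- A's second pass: elementwise effect, given that the dict reports true counts and position lists
theorem pvPhase2_getD (toks : List String) (d : PySem.Dict String (Int × List Nat)) (keys : List String)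
    (hg : ∀ k ∈ keys, d.getD k (0, []) = (((toks.count k : Nat) : Int), pvIdxs toks k))
    (acc : List String) (hlen : acc.length = toks.length) (j : Nat) (hj : j < toks.length) :
    (keys.foldl (fun lst key => if (d.getD key (0, [])).1 > 1 then (d.getD key (0, [])).2.foldl (fun l i => l.set i "") lst else lst) acc).getD j ""
      = if toks.getD j "" ∈ keys ∧ 1 < toks.count (toks.getD j "") then "" else acc.getD j "" := by
  induction keys generalizing acc with
  | nil => simp
  | cons k ks ih =>
    rw [List.foldl_cons]
    have hgk := hg k (List.mem_cons_self)
    have hg' : ∀ k' ∈ ks, d.getD k' (0, []) = (((toks.count k' : Nat) : Int), pvIdxs toks k') :=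
      fun k' h => hg k' (List.mem_cons_of_mem _ h)
    by_cases hcnt : (d.getD k (0, ([] : List Nat))).1 > 1
    · have hcnt' : 1 < toks.count k := by rw [hgk] at hcnt; simpa using hcnt
      rw [if_pos hcnt, ih hg' _ (by rw [pvSetAll_length, hlen])]
      have hset : ((d.getD k (0, ([] : List Nat))).2.foldl (fun l i => l.set i "") acc).getD j ""
          = if toks.getD j "" = k then "" else acc.getD j "" := by
        rw [pvSetAll_getD _ _ _ (by omega), hgk]
        simp only [pvMem_pvIdxs]
        by_cases h : toks.getD j "" = k
        · rw [if_pos ⟨hj, h⟩, if_pos h]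
        · rw [if_neg (fun hc => h hc.2), if_neg h]
      rw [hset]
      simp only [List.mem_cons]
      by_cases h : toks.getD j "" = k
      · rw [h, if_pos rfl]
        simp [hcnt']
      · rw [if_neg h]
        simp only [h, false_or]
    · have hcnt' : ¬ 1 < toks.count k := by rw [hgk] at hcnt; simpa using hcnt
      rw [if_neg hcnt, ih hg' _ hlen]
      simp only [List.mem_cons]
      by_cases h : toks.getD j "" = k
      · rw [h]
        simp [hcnt']
      · simp only [h, false_or]

-- the whole pipeline of A, at the level of token lists
theorem pvCore (qs ss : List String) :
    (let tokenization := qs ++ ss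
     let duplicates :=
       (List.range tokenization.length).foldl
         (fun d idx =>
           let t := tokenization.getD idx ""
           match d.get? t with
           | some v => d.insert t (v.1 + 1, v.2 ++ [idx])
           | none   => d.insert t ((1 : Int), ([idx] : List Nat)))
         (PySem.Dict.empty : PySem.Dict String (Int × List Nat))
     duplicates.keys.foldl
       (fun lst key =>
         let v := duplicates.getD key (0, [])
         if v.1 > 1 then v.2.foldl (fun l i => l.set i "") lst else lst)
       tokenization)
    = (qs ++ ss).map (fun t => if (((qs ++ ss).count t : Nat) : Int) == 1 then t else "") := by
  set toks := qs ++ ss with htoks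
  obtain ⟨hnd, hget⟩ := pvBuild_spec toks toks.length le_rfl
  set d := (List.range toks.length).foldl
    (fun d idx =>
      let t := toks.getD idx ""
      match d.get? t with
      | some v => d.insert t (v.1 + 1, v.2 ++ [idx])
      | none   => d.insert t ((1 : Int), ([idx] : List Nat)))
    (PySem.Dict.empty : PySem.Dict String (Int × List Nat)) with hd
  simp only [List.take_length] at hget
  have hget' : ∀ k, d.get? k = if k ∈ toks then some (((toks.count k : Nat) : Int), pvIdxs toks k) else none := by
    intro k; rw [hget k]; rfl
  have hmemkeys : ∀ k, k ∈ toks → k ∈ d.keys := by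
    intro k hk
    by_contra hnk
    have := (PySem.Dict.get?_eq_none_iff_not_mem_keys (d := d) (k := k)).mpr hnk
    rw [hget' k, if_pos hk] at this
    exact absurd this (by simp)
  have hg : ∀ k ∈ d.keys, d.getD k (0, ([] : List Nat)) = (((toks.count k : Nat) : Int), pvIdxs toks k) := by
    intro k hk
    have hne : d.get? k ≠ none := by
      rw [Ne, PySem.Dict.get?_eq_none_iff_not_mem_keys]; simpa using hk
    rw [hget' k] at hne
    by_cases hmem : k ∈ toks
    · rw [PySem.Dict.getD_eq_get?_getD, hget' k, if_pos hmem]; rfl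
    · exact absurd (by rw [if_neg hmem]) hne
  show (d.keys.foldl (fun lst key => if (d.getD key (0, [])).1 > 1 then (d.getD key (0, [])).2.foldl (fun l i => l.set i "") lst else lst) toks)
      = toks.map (fun t => if ((toks.count t : Nat) : Int) == 1 then t else "")
  apply List.ext_getElem
  · rw [pvPhase2_length, List.length_map]
  · intro j h1 h2
    have hj : j < toks.length := by simpa using h2
    have hT : _ = _ := pvPhase2_getD toks d d.keys hg toks rfl j hj
    have hgetDj : toks.getD j "" = toks[j] := by
      rw [List.getD_eq_getElem?_getD, List.getElem?_eq_getElem hj]; rfl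
    have hL : (d.keys.foldl (fun lst key => if (d.getD key (0, [])).1 > 1 then (d.getD key (0, [])).2.foldl (fun l i => l.set i "") lst else lst) toks)[j]
        = (d.keys.foldl (fun lst key => if (d.getD key (0, [])).1 > 1 then (d.getD key (0, [])).2.foldl (fun l i => l.set i "") lst else lst) toks).getD j "" := by
      rw [List.getD_eq_getElem?_getD, List.getElem?_eq_getElem h1]; rfl
    rw [hL, hT, hgetDj]
    have hmemj : toks[j] ∈ toks := List.getElem_mem hj
    have hcntpos : 0 < toks.count toks[j] := List.count_pos_iff.mpr hmemj
    rw [List.getElem_map]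
    by_cases hc : 1 < toks.count toks[j]
    · rw [if_pos ⟨hmemkeys _ hmemj, hc⟩]
      have : ¬ ((toks.count toks[j] : Nat) : Int) = 1 := by
        intro h; omega
      simp [this]
    · have hone : toks.count toks[j] = 1 := by omega
      rw [if_neg (fun hh => hc hh.2), hone]
      simp

-- on tokens of `this`, A's "total count over this++other == 1" test is B's cross-check, negated
theorem pvCond (ts other : List String) (t : String) (ht : t ∈ ts) :
    ((((ts ++ other).count t : Nat) : Int) == 1)
      = !(decide (PySem.List.count ts t > 1) || other.contains t) := by
  simp only [PySem.List.count_eq, List.count_append]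
  have h1 : 1 ≤ ts.count t := List.count_pos_iff.mpr ht
  have hco : other.contains t = decide (t ∈ other) := by
    simp
  rw [hco]
  by_cases h2 : 1 < ts.count t
  · have hne : ¬ ((ts.count t : Int) + (other.count t : Int) = 1) := by omega
    simp [hne, h2]
  · have hone : ts.count t = 1 := by omega
    by_cases h3 : t ∈ other
    · have h4 : 0 < other.count t := List.count_pos_iff.mpr h3
      simp [h2, h3]
      omega
    · have h4 : other.count t = 0 := List.count_eq_zero_of_not_mem h3
      simp [h2, h3]
      omega

theorem pvBlank_eq (ts other : List String) :
    ts.map (fun t => if (((ts ++ other).count t : Nat) : Int) == 1 then t else "")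
      = ts.map (fun t => if PySem.List.count ts t > 1 || other.contains t then "" else t) := by
  apply List.map_congr_left
  intro t ht
  rw [pvCond ts other t ht]
  cases h : (decide (PySem.List.count ts t > 1) || other.contains t) <;> simp

-- ===== VERDICT (by name: the statement is the Claim_ definition above) =====
theorem removeMatchedWord_spec : Claim_equal_removeMatchedWord := by
  intro query_string tokenize_sentence _
  unfold Spec_removeMatchedWord removeMatchedWord removeMatchedWord_alt removeMatchedWordBlank
  have hcore := pvCore ((PySem.Str.split? query_string " ").getD []) ((PySem.Str.split? tokenize_sentence " ").getD [])
  set qs := (PySem.Str.split? query_string " ").getD [] with hqs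
  set ss := (PySem.Str.split? tokenize_sentence " ").getD [] with hss
  simp only [] at hcore ⊢
  rw [hcore]
  have hslice1 : PySem.List.slice ((qs ++ ss).map (fun t => if (((qs ++ ss).count t : Nat) : Int) == 1 then t else "")) (some 0) (some (qs.length : Int))
      = qs.map (fun t => if (((qs ++ ss).count t : Nat) : Int) == 1 then t else "") := by
    rw [PySem.List.slice_toNat _ (by omega) (by omega)]
    simp only [Int.toNat_natCast, Int.toNat_zero, Nat.sub_zero, List.drop_zero, List.map_append]
    exact List.take_left' (by rw [List.length_map])
  have hslice2 : PySem.List.slice ((qs ++ ss).map (fun t => if (((qs ++ ss).count t : Nat) : Int) == 1 then t else "")) (some (qs.length : Int)) none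
      = ss.map (fun t => if (((qs ++ ss).count t : Nat) : Int) == 1 then t else "") := by
    rw [PySem.List.slice_from _ (by omega)]
    simp only [Int.toNat_natCast, List.map_append]
    exact List.drop_left' (by rw [List.length_map])
  have hcntcomm : ∀ t : String, (ss ++ qs).count t = (qs ++ ss).count t := by
    intro t; rw [List.count_append, List.count_append]; omega
  have hmap2 : ss.map (fun t => if (((qs ++ ss).count t : Nat) : Int) == 1 then t else "")
      = ss.map (fun t => if (((ss ++ qs).count t : Nat) : Int) == 1 then t else "") := by
    apply List.map_congr_left; intro t _; rw [hcntcomm t]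
  rw [hslice1, hslice2, hmap2, pvBlank_eq qs ss, pvBlank_eq ss qs]
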